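-- pv_equiv track=rewrite | github.com/Unknownflow/CS1010X | Extra Practices/CG1101 Recursion and Iteration Questions/q3.py | goldbach
-- ===== SOURCE A (Python) =====
-- from math import sqrt
--
-- def goldbach(n):
--
--     # code to test Goldbach's Conjecture on an input n
--
--
--
--     def isPrime(n):
--
--         # check whether the number is divisible by i up till sqrt(n)+1
--
--         if n <= 1:
--
--             return False
--
--         upper_bound = int(sqrt(n))+1
--
--         for i in range(2, upper_bound):
--
--             if n % i == 0:
--
--                 return False # if number is not prime, return false
--
--         return True
--
--     primes_arr = []
--
--     # create an array of primes
--
--     for i in range(2, n):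
--
--         if isPrime(i):
--
--             primes_arr.append(i)
--
--     for i in primes_arr:
--
--         for j in primes_arr:
--
--             # check whether the sum of 2 primes matches n
--
--             if i + j == n:
--
--                 return True
--
--     return False
-- ===== SOURCE B (Python) =====
-- def goldbach(n):
--     # one pass: p is prime and n-p is prime, no prime list, no nested scan
--     def is_prime(p):
--         if p < 2:
--             return False
--         d = 2
--         while d * d <= p:
--             if p % d == 0:
--                 return False
--             d += 1
--         return True
--     return any(is_prime(p) and is_prime(n - p) for p in range(2, n))
-- ===== Notes on version B (the rewrite author's own statement) =====
-- stated objective: faster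
-- what changed: Instead of building the full list of primes below n and scanning all pairs (i,j) for i+j==n, B makes a single pass over p in [2,n) testing is_prime(p) and is_prime(n-p), eliminating the prime array and the quadratic double loop.
import Mathlib
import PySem

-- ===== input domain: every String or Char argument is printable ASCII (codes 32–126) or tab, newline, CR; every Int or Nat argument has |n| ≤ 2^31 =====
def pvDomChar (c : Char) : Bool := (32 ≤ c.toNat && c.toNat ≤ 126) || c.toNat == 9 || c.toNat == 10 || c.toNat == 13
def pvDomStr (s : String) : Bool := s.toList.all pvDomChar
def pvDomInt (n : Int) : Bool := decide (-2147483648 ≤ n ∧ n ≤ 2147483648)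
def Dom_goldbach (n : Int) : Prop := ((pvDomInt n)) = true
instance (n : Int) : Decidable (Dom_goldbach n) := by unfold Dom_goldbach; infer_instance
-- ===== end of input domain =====

-- B replaces A's prime list + quadratic pair scan by a single pass testing p and n-p for primality (objective: faster).

-- ===== PORT A =====
-- isPrime: trial division up to int(sqrt(n))+1 (int(math.sqrt(n)) = Nat.sqrt exactly for 0 ≤ n ≤ 2^31)
def pvIsPrimeA (n : Int) : Bool :=
  if n ≤ 1 then false
  else
    let upperBound : Int := (Nat.sqrt n.toNat : Int) + 1
    (PySem.List.pyRange 2 upperBound 1).all (fun i => !(PySem.Int.mod n i == 0))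

def goldbach (n : Int) : Bool :=
  let primesArr : List Int := (PySem.List.pyRange 2 n 1).filter pvIsPrimeA
  primesArr.any (fun i => primesArr.any (fun j => i + j == n))

-- ===== PORT B =====
-- 'while d * d <= p' loop; fuel p.toNat only makes the recursion structural, never exhausted
def pvIsPrimeBGo (p d : Int) : Nat → Bool
  | 0 => true
  | fuel + 1 =>
    if d * d ≤ p then
      if PySem.Int.mod p d == 0 then false else pvIsPrimeBGo p (d + 1) fuel
    else true

def pvIsPrimeB (p : Int) : Bool :=
  if p < 2 then false else pvIsPrimeBGo p 2 p.toNat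

def goldbach_alt (n : Int) : Bool :=
  (PySem.List.pyRange 2 n 1).any (fun p => pvIsPrimeB p && pvIsPrimeB (n - p))

-- ===== PRECONDITION & SPEC =====
def Spec_goldbach (n : Int) (out : Bool) : Prop := out = goldbach_alt n
instance (n : Int) (out : Bool) : Decidable (Spec_goldbach n out) := by unfold Spec_goldbach; infer_instance

-- ===== CLAIM (what is proved, stated in full; the proofs are below) =====
def Claim_equal_goldbach : Prop := ∀ (n : Int), Dom_goldbach n → Spec_goldbach n (goldbach n)

-- ===== LEMMAS AND PROOFS =====

-- the shared notion both primality tests decide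
def NoSmallDiv (p : Int) : Prop := ∀ e : Int, 2 ≤ e → e * e ≤ p → ¬ PySem.Int.mod p e = 0

lemma pvIsPrimeBGo_iff (p : Int) (fuel : Nat) : ∀ d : Int, 2 ≤ d → p < (d + fuel) * (d + fuel) →
    (pvIsPrimeBGo p d fuel = true ↔ ∀ e : Int, d ≤ e → e * e ≤ p → ¬ PySem.Int.mod p e = 0) := by
  induction fuel with
  | zero =>
    intro d hd hfuel
    simp only [pvIsPrimeBGo, true_iff]
    intro e he hee
    exfalso
    have : d * d ≤ e * e := mul_le_mul he he (by omega) (by omega)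
    simp only [Nat.cast_zero, add_zero] at hfuel
    omega
  | succ fuel ih =>
    intro d hd hfuel
    have hfuel' : p < (d + 1 + fuel) * (d + 1 + fuel) := by
      have : ((fuel + 1 : Nat) : Int) = (fuel : Int) + 1 := by push_cast; ring
      rw [this] at hfuel; linarith [hfuel]
    simp only [pvIsPrimeBGo]
    by_cases hdd : d * d ≤ p
    · simp only [if_pos hdd]
      by_cases hmod : PySem.Int.mod p d = 0
      · simp only [hmod, beq_self_eq_true, if_pos]
        constructor
        · intro h; exact (Bool.false_ne_true h).elim
        · intro h; exact (h d le_rfl hdd hmod).elim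
      · have : (PySem.Int.mod p d == 0) = false := by simpa using hmod
        simp only [this, Bool.false_eq_true, if_false]
        rw [ih (d + 1) (by omega) hfuel']
        constructor
        · intro h e he hee
          rcases eq_or_lt_of_le he with rfl | hlt
          · exact hmod
          · exact h e (by omega) hee
        · intro h e he hee; exact h e (by omega) hee
    · simp only [if_neg hdd, true_iff]
      intro e he hee
      exfalso
      have : d * d ≤ e * e := mul_le_mul he he (by omega) (by omega)
      omega

lemma pvIsPrimeB_iff (p : Int) (hp : 2 ≤ p) : (pvIsPrimeB p = true ↔ NoSmallDiv p) := by
  unfold pvIsPrimeB NoSmallDiv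
  rw [if_neg (by omega)]
  apply pvIsPrimeBGo_iff p p.toNat 2 le_rfl
  have h1 : ((p.toNat : Int)) = p := Int.toNat_of_nonneg (by omega)
  nlinarith [h1]

lemma le_sqrt_iff_sq_le (n e : Int) (hn : 2 ≤ n) (he : 2 ≤ e) :
    e ≤ (Nat.sqrt n.toNat : Int) ↔ e * e ≤ n := by
  have hn' : ((n.toNat : Int)) = n := Int.toNat_of_nonneg (by omega)
  have he' : ((e.toNat : Int)) = e := Int.toNat_of_nonneg (by omega)
  rw [← hn', ← he']
  constructor
  · intro h
    have h1 : e.toNat ≤ Nat.sqrt n.toNat := by exact_mod_cast h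
    exact_mod_cast Nat.le_sqrt.mp h1
  · intro h
    have h2 : e.toNat * e.toNat ≤ n.toNat := by exact_mod_cast h
    exact_mod_cast Nat.le_sqrt.mpr h2

lemma pvIsPrimeA_iff (n : Int) (hn : 2 ≤ n) : (pvIsPrimeA n = true ↔ NoSmallDiv n) := by
  unfold pvIsPrimeA NoSmallDiv
  rw [if_neg (by omega)]
  simp only [List.all_eq_true, PySem.List.mem_pyRange_one, Bool.not_eq_eq_eq_not, Bool.not_true,
    beq_eq_false_iff_ne, ne_eq]
  constructor
  · intro h e he hee
    exact h e ⟨he, by have := (le_sqrt_iff_sq_le n e hn he).mpr hee; omega⟩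
  · intro h e ⟨he1, he2⟩
    exact h e he1 ((le_sqrt_iff_sq_le n e hn he1).mp (by omega))

lemma isPrime_eq (p : Int) : pvIsPrimeB p = pvIsPrimeA p := by
  by_cases hp : 2 ≤ p
  · rw [Bool.eq_iff_iff, pvIsPrimeB_iff p hp, pvIsPrimeA_iff p hp]
  · unfold pvIsPrimeB pvIsPrimeA
    rw [if_pos (by omega), if_pos (by omega)]

lemma pvIsPrimeB_two_le {p : Int} (h : pvIsPrimeB p = true) : 2 ≤ p := by
  by_contra hc
  unfold pvIsPrimeB at h
  rw [if_pos (by omega)] at h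
  exact Bool.false_ne_true h

-- ===== VERDICT (by name: the statement is the Claim_ definition above) =====
theorem goldbach_spec : Claim_equal_goldbach := by
  intro n _
  unfold Spec_goldbach goldbach goldbach_alt
  rw [Bool.eq_iff_iff]
  simp only [List.any_eq_true, List.mem_filter, PySem.List.mem_pyRange_one, beq_iff_eq,
    Bool.and_eq_true]
  constructor
  · rintro ⟨i, ⟨⟨hi1, hi2⟩, hip⟩, j, ⟨⟨hj1, hj2⟩, hjp⟩, hij⟩
    refine ⟨i, ⟨hi1, hi2⟩, ?_, ?_⟩
    · rw [isPrime_eq]; exact hip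
    · rw [isPrime_eq]; have : n - i = j := by omega
      rw [this]; exact hjp
  · rintro ⟨p, ⟨hp1, hp2⟩, hpp, hqq⟩
    have hq2 : 2 ≤ n - p := pvIsPrimeB_two_le hqq
    refine ⟨p, ⟨⟨hp1, hp2⟩, by rw [← isPrime_eq]; exact hpp⟩,
           n - p, ⟨⟨hq2, by omega⟩, by rw [← isPrime_eq]; exact hqq⟩, by ring⟩
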